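-- pv_equiv track=rewrite | github.com/jguida941/voiceterm | dev/scripts/checks/check_mutation_score.py | counts_from_outcomes
-- ===== SOURCE A (Python) =====
-- from typing import Dict, List, Tuple
--
-- def counts_from_outcomes(data: Dict) -> Tuple[int, int, int, int]:
--     """Fallback counter for older/newer outcomes schema variants."""
--     caught = 0
--     missed = 0
--     timeout = 0
--     unviable = 0
--
--     for outcome in data.get("outcomes", []):
--         summary = outcome.get("summary")
--         if summary in {"CaughtMutant", "Killed"}:
--             caught += 1
--         elif summary in {"MissedMutant", "Survived"}:
--             missed += 1
--         elif summary == "Timeout":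
--             timeout += 1
--         elif summary == "Unviable":
--             unviable += 1
--
--     return caught, missed, timeout, unviable
-- ===== SOURCE B (Python) =====
-- def counts_from_outcomes(data):
--     """Fallback counter for older/newer outcomes schema variants."""
--     summaries = [o.get("summary") for o in data.get("outcomes", [])]
--     return (
--         summaries.count("CaughtMutant") + summaries.count("Killed"),
--         summaries.count("MissedMutant") + summaries.count("Survived"),
--         summaries.count("Timeout"),
--         summaries.count("Unviable"),
--     )
-- ===== Notes on version B (the rewrite author's own statement) =====
-- stated objective: idiomatic
-- what changed: Replaces the single accumulator loop with its if/elif dispatch by first projecting the summary strings into a list and then making six independent list.count passes, one per label, aggregated into the tuple.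
import Mathlib
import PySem

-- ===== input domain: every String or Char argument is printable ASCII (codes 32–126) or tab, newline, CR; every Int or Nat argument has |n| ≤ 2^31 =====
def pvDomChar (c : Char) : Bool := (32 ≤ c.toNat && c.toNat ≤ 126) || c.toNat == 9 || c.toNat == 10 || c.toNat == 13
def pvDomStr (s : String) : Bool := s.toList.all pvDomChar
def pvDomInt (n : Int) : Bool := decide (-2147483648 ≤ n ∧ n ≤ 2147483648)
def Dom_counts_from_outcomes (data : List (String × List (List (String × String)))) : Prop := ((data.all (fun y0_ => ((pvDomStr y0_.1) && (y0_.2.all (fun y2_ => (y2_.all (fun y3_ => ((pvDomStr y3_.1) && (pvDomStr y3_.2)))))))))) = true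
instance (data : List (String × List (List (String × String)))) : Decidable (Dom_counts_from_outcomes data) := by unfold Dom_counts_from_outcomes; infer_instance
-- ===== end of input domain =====

-- B replaces A's single accumulator loop with if/elif dispatch by a projection of the
-- summaries followed by six independent list.count passes (objective: idiomatic).

-- outcome.get("summary") (each Python does exactly this lookup)
def pvSummary (outcome : List (String × String)) : Option String :=
  (PySem.Dict.mk outcome).get? "summary"

-- ===== PORT A =====
-- the body of A's for-loop: the if/elif chain updating the four counters
def pvStepA (acc : Int × Int × Int × Int) (outcome : List (String × String)) :
    Int × Int × Int × Int :=
  let summary := pvSummary outcome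
  if summary = some "CaughtMutant" ∨ summary = some "Killed" then
    (acc.1 + 1, acc.2.1, acc.2.2.1, acc.2.2.2)
  else if summary = some "MissedMutant" ∨ summary = some "Survived" then
    (acc.1, acc.2.1 + 1, acc.2.2.1, acc.2.2.2)
  else if summary = some "Timeout" then
    (acc.1, acc.2.1, acc.2.2.1 + 1, acc.2.2.2)
  else if summary = some "Unviable" then
    (acc.1, acc.2.1, acc.2.2.1, acc.2.2.2 + 1)
  else acc

def counts_from_outcomes (data : List (String × List (List (String × String)))) :
    Int × Int × Int × Int :=
  ((PySem.Dict.mk data).getD "outcomes" []).foldl pvStepA (0, 0, 0, 0)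

-- ===== PORT B =====
def counts_from_outcomes_alt (data : List (String × List (List (String × String)))) :
    Int × Int × Int × Int :=
  -- summaries = [o.get("summary") for o in data.get("outcomes", [])]
  let summaries := ((PySem.Dict.mk data).getD "outcomes" []).map pvSummary
  (PySem.List.count summaries (some "CaughtMutant") + PySem.List.count summaries (some "Killed"),
   PySem.List.count summaries (some "MissedMutant") + PySem.List.count summaries (some "Survived"),
   PySem.List.count summaries (some "Timeout"),
   PySem.List.count summaries (some "Unviable"))

-- ===== PRECONDITION & SPEC =====
def Spec_counts_from_outcomes (data : List (String × List (List (String × String)))) (out : Int × Int × Int × Int) : Prop := out = counts_from_outcomes_alt data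
instance (data : List (String × List (List (String × String)))) (out : Int × Int × Int × Int) : Decidable (Spec_counts_from_outcomes data out) := by unfold Spec_counts_from_outcomes; infer_instance

-- ===== CLAIM (what is proved, stated in full; the proofs are below) =====
def Claim_equal_counts_from_outcomes : Prop := ∀ (data : List (String × List (List (String × String)))), Dom_counts_from_outcomes data → Spec_counts_from_outcomes data (counts_from_outcomes data)

-- ===== LEMMAS AND PROOFS =====

-- A's if/elif step, written as a sum of per-label indicators
lemma stepA_eq (acc : Int × Int × Int × Int) (y : List (String × String)) :
    pvStepA acc y =
      (acc.1 + (if pvSummary y = some "CaughtMutant" then (1:Int) else 0)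
             + (if pvSummary y = some "Killed" then (1:Int) else 0),
       acc.2.1 + (if pvSummary y = some "MissedMutant" then (1:Int) else 0)
               + (if pvSummary y = some "Survived" then (1:Int) else 0),
       acc.2.2.1 + (if pvSummary y = some "Timeout" then (1:Int) else 0),
       acc.2.2.2 + (if pvSummary y = some "Unviable" then (1:Int) else 0)) := by
  unfold pvStepA
  split_ifs <;> simp_all

-- A's loop computes, on top of any starting accumulator, the per-label counts of the summaries
lemma foldA_counts (ys : List (List (String × String))) :
    ∀ acc : Int × Int × Int × Int,
      ys.foldl pvStepA acc =
        (acc.1 + ((ys.map pvSummary).count (some "CaughtMutant") : Int)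
               + ((ys.map pvSummary).count (some "Killed") : Int),
         acc.2.1 + ((ys.map pvSummary).count (some "MissedMutant") : Int)
                 + ((ys.map pvSummary).count (some "Survived") : Int),
         acc.2.2.1 + ((ys.map pvSummary).count (some "Timeout") : Int),
         acc.2.2.2 + ((ys.map pvSummary).count (some "Unviable") : Int)) := by
  induction ys with
  | nil => intro acc; simp
  | cons y ys ih =>
    intro acc
    rw [List.foldl_cons, ih, stepA_eq]
    simp only [List.map_cons, List.count_cons, Prod.mk.injEq, beq_iff_eq]
    refine ⟨?_, ?_, ?_, ?_⟩ <;> split_ifs <;> simp_all <;> omega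

-- ===== VERDICT (by name: the statement is the Claim_ definition above) =====
theorem counts_from_outcomes_spec : Claim_equal_counts_from_outcomes := by
  intro data _
  unfold Spec_counts_from_outcomes counts_from_outcomes counts_from_outcomes_alt
  rw [foldA_counts]
  simp [PySem.List.count_eq]
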